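-- pv_equiv track=rewrite | github.com/1740928596/python- | 32_gpt.py | check_symbols
-- ===== SOURCE A (Python) =====
-- def check_symbols(source_code):
--     stack = []
--     i = 0
--     n = len(source_code)
--
--     matching_symbols = {
--         '(': ')',
--         '{': '}',
--         '[': ']',
--         '/*': '*/'
--     }
--     opening_symbols = set(matching_symbols.keys())
--     closing_symbols = set(matching_symbols.values())
--
--     while i < n:
--         if source_code[i:i+2] == '/*':
--             symbol = '/*'
--             i += 2
--         elif source_code[i:i+2] == '*/':
--             symbol = '*/'
--             i += 2
--         else:
--             symbol = source_code[i]
--             i += 1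
--
--         if symbol in opening_symbols:
--             stack.append(symbol)
--         elif symbol in closing_symbols:
--             if not stack:
--                 return "NO\n?-{}".format(symbol)
--             top = stack.pop()
--             if matching_symbols.get(top) != symbol:
--                 return "NO\n{}-?".format(top)
--
--     if stack:
--         return "NO\n{}-?".format(stack[-1])
--
--     return "YES"
-- ===== SOURCE B (Python) =====
-- PAIRS = {'(': ')', '{': '}', '[': ']', '/*': '*/'}
-- CLOSERS = {')', '}', ']', '*/'}
--
--
-- def bracket_tokens(source_code):
--     """Greedy left-to-right token scan keeping only bracket tokens ('/*' and
--     '*/' taken as two-char tokens); other characters are irrelevant."""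
--     toks = []
--     i = 0
--     while i < len(source_code):
--         two = source_code[i:i+2]
--         if two == '/*' or two == '*/':
--             toks.append(two)
--             i += 2
--         elif source_code[i] in '(){}[]':
--             toks.append(source_code[i])
--             i += 1
--         else:
--             i += 1
--     return toks
--
--
-- def check_symbols(source_code):
--     # Rewriting system instead of a stack: repeatedly cancel adjacent matched
--     # opener/closer pairs until a fixpoint (irreducible residue) is reached.
--     toks = bracket_tokens(source_code)
--     while True:
--         out = []
--         i = 0
--         while i < len(toks):
--             if i + 1 < len(toks) and PAIRS.get(toks[i]) == toks[i + 1]: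
--                 i += 2  # cancel the matched pair
--             else:
--                 out.append(toks[i])
--                 i += 1
--         if out == toks:
--             break
--         toks = out
--     # Stackless readout from the irreducible residue: the first closer (if any)
--     # determines the error; otherwise the last leftover opener does.
--     prev = None
--     for t in toks:
--         if t in CLOSERS:
--             if prev is None:
--                 return "NO\n?-" + t
--             return "NO\n" + prev + "-?"
--         prev = t
--     if prev is not None:
--         return "NO\n" + prev + "-?"
--     return "YES"
-- ===== Notes on version B (the rewrite author's own statement) =====
-- stated objective: alternative
-- what changed: B replaces A's single stack-driven scan by a rewriting system: it extracts the bracket tokens, repeatedly cancels adjacent matched opener/closer pairs until a fixpoint (irreducible residue), and reads the answer off the residue without any stack (first closer or last leftover opener determines the message).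
import Mathlib
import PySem

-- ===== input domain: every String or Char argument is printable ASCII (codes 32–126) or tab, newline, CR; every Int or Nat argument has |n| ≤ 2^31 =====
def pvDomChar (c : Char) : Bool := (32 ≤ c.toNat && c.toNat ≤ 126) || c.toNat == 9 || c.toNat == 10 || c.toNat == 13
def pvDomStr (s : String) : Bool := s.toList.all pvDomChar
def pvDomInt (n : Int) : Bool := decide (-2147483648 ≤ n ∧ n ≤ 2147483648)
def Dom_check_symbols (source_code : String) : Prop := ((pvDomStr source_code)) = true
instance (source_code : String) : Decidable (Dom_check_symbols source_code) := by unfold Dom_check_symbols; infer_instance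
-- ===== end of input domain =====

-- B replaces A's stack scan by fixpoint cancellation of adjacent matched pairs
-- plus a stackless readout of the residue; same return values (alternative algorithm).

-- ===== PORT A =====
-- helper tables: matching_symbols.get and the opening/closing membership tests
def aGet (t : String) : Option String :=
  if t = "(" then some ")" else if t = "{" then some "}"
  else if t = "[" then some "]" else if t = "/*" then some "*/" else none

def aOpen (t : String) : Bool := t = "(" || t = "{" || t = "[" || t = "/*"

def aClose (t : String) : Bool := t = ")" || t = "}" || t = "]" || t = "*/"

-- used by aLoop's decreasing_by
theorem aRest_len {A B : Prop} [Decidable A] [Decidable B] (c : Char) (rest : List Char)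
    (x y z : String) :
    ((if A then (x, rest.drop 1) else if B then (y, rest.drop 1) else (z, rest)).2).length
      < (c :: rest).length := by
  split_ifs <;> simp

-- A's while loop: slice test for '/*' / '*/', then classify the symbol against the stack
def aLoop : List Char → List String → String
  | [], stack =>
    match stack with
    | [] => "YES"
    | top :: _ => "NO\n" ++ top ++ "-?"
  | c :: rest, stack =>
    let p : String × List Char :=
      if (c :: rest).take 2 = ['/', '*'] then ("/*", rest.drop 1)
      else if (c :: rest).take 2 = ['*', '/'] then ("*/", rest.drop 1)
      else (String.ofList [c], rest)
    if aOpen p.1 then aLoop p.2 (p.1 :: stack)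
    else if aClose p.1 then
      match stack with
      | [] => "NO\n?-" ++ p.1
      | top :: s' => if aGet top ≠ some p.1 then "NO\n" ++ top ++ "-?" else aLoop p.2 s'
    else aLoop p.2 stack
termination_by cs _ => cs.length
decreasing_by all_goals exact aRest_len c rest _ _ _

def check_symbols (source_code : String) : String :=
  aLoop source_code.toList []

-- ===== PORT B =====
-- Source B's PAIRS/CLOSERS are the same constant tables as A's matching_symbols: aGet / aClose are shared
-- bracket_tokens: greedy scan keeping only bracket tokens ('/*','*/' two-char, '(){}[]' one-char)
def bTok : List Char → List String
  | [] => []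
  | c :: rest =>
    let two := (c :: rest).take 2
    if two = ['/', '*'] then "/*" :: bTok (rest.drop 1)
    else if two = ['*', '/'] then "*/" :: bTok (rest.drop 1)
    else if c = '(' || c = ')' || c = '{' || c = '}' || c = '[' || c = ']' then
      String.ofList [c] :: bTok rest
    else bTok rest
termination_by cs => cs.length
decreasing_by all_goals simp


-- one cancellation pass: drop each adjacent matched opener/closer pair found left to right
def onePass : List String → List String
  | [] => []
  | [t] => [t]
  | t :: u :: rest => if aGet t = some u then onePass rest else t :: onePass (u :: rest)

-- branch-unfolding lemmas for onePass and bTok (used throughout the proofs)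
theorem onePass_pos {t u : String} (rest : List String) (h : aGet t = some u) :
    onePass (t :: u :: rest) = onePass rest := by simp [onePass, h]

theorem onePass_neg {t u : String} (rest : List String) (h : ¬ aGet t = some u) :
    onePass (t :: u :: rest) = t :: onePass (u :: rest) := by simp [onePass, h]

-- used by reduceFix's decreasing_by and by the proofs below
theorem onePass_length : ∀ ts : List String, (onePass ts).length ≤ ts.length := by
  intro ts
  induction ts using onePass.induct with
  | case1 => simp [onePass]
  | case2 t => simp [onePass]
  | case3 t u rest h ih => rw [onePass_pos rest h]; simp only [List.length_cons]; omega
  | case4 t u rest h ih =>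
    rw [onePass_neg rest h]; simp only [List.length_cons] at ih ⊢; omega

theorem onePass_lt {ts : List String} (h : ¬ onePass ts = ts) :
    (onePass ts).length < ts.length := by
  induction ts using onePass.induct with
  | case1 => simp [onePass] at h
  | case2 t => simp [onePass] at h
  | case3 t u rest hg ih =>
    have := onePass_length rest
    rw [onePass_pos rest hg]
    simp only [List.length_cons]; omega
  | case4 t u rest hg ih =>
    rw [onePass_neg rest hg] at h ⊢
    have hne : ¬ onePass (u :: rest) = u :: rest := by
      intro he; exact h (by rw [he])
    have := ih hne
    simp only [List.length_cons] at this ⊢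
    omega

-- the while-True loop: iterate onePass to its fixpoint
def reduceFix (ts : List String) : List String :=
  let u := onePass ts
  if u = ts then ts else reduceFix u
termination_by ts.length
decreasing_by exact onePass_lt (by assumption)

-- stackless readout of the irreducible residue, carrying the previous token
def readout : Option String → List String → String
  | none, [] => "YES"
  | some p, [] => "NO\n" ++ p ++ "-?"
  | prev, t :: ts =>
    if aClose t then
      match prev with
      | none => "NO\n?-" ++ t
      | some p => "NO\n" ++ p ++ "-?"
    else readout (some t) ts

def check_symbols_alt (source_code : String) : String :=
  readout none (reduceFix (bTok source_code.toList))

-- ===== PRECONDITION & SPEC =====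
def Spec_check_symbols (source_code : String) (out : String) : Prop := out = check_symbols_alt source_code
instance (source_code : String) (out : String) : Decidable (Spec_check_symbols source_code out) := by unfold Spec_check_symbols; infer_instance

-- ===== CLAIM (what is proved, stated in full; the proofs are below) =====
def Claim_equal_check_symbols : Prop := ∀ (source_code : String), Dom_check_symbols source_code → Spec_check_symbols source_code (check_symbols source_code)

-- ===== LEMMAS AND PROOFS =====

-- A's loop, rephrased on token lists (bridge between the two sides)
def runTok : List String → List String → String
  | [], [] => "YES"
  | [], top :: _ => "NO\n" ++ top ++ "-?"
  | t :: ts, stack =>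
    match aGet t with
    | some _ => runTok ts (t :: stack)
    | none =>
      if aClose t then
        match stack with
        | [] => "NO\n?-" ++ t
        | top :: s' => if aGet top ≠ some t then "NO\n" ++ top ++ "-?" else runTok ts s'
      else runTok ts stack

-- branch-unfolding lemmas for bTok and runTok
theorem bTokA {c : Char} {rest : List Char} (h : (c :: rest).take 2 = ['/', '*']) :
    bTok (c :: rest) = "/*" :: bTok (rest.drop 1) := by rw [bTok]; simp [h]

theorem bTokB {c : Char} {rest : List Char} (_h1 : ¬ (c :: rest).take 2 = ['/', '*'])
    (h2 : (c :: rest).take 2 = ['*', '/']) :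
    bTok (c :: rest) = "*/" :: bTok (rest.drop 1) := by rw [bTok]; simp [h2]

theorem bTokC {c : Char} {rest : List Char} (h1 : ¬ (c :: rest).take 2 = ['/', '*'])
    (h2 : ¬ (c :: rest).take 2 = ['*', '/'])
    (h3 : (c = '(' || c = ')' || c = '{' || c = '}' || c = '[' || c = ']') = true) :
    bTok (c :: rest) = String.ofList [c] :: bTok rest := by
  rw [bTok]
  split_ifs
  rfl

theorem bTokD {c : Char} {rest : List Char} (h1 : ¬ (c :: rest).take 2 = ['/', '*'])
    (h2 : ¬ (c :: rest).take 2 = ['*', '/'])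
    (h3 : ¬ (c = '(' || c = ')' || c = '{' || c = '}' || c = '[' || c = ']') = true) :
    bTok (c :: rest) = bTok rest := by
  rw [bTok]
  split_ifs
  rfl

theorem runTok_opener {t cl : String} (hg : aGet t = some cl) (ts st : List String) :
    runTok (t :: ts) st = runTok ts (t :: st) := by
  rw [runTok.eq_def]; simp [hg]

theorem runTok_closer {t : String} (hg : aGet t = none) (hc : aClose t = true)
    (ts : List String) : ∀ st : List String,
    runTok (t :: ts) st =
      match st with
      | [] => "NO\n?-" ++ t
      | top :: s' => if aGet top ≠ some t then "NO\n" ++ top ++ "-?" else runTok ts s' := by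
  intro st
  rw [runTok.eq_def]; simp [hg, hc]

theorem runTok_skip {t : String} (hg : aGet t = none) (hc : aClose t = false)
    (ts st : List String) : runTok (t :: ts) st = runTok ts st := by
  rw [runTok.eq_def]; simp [hg, hc]

theorem sne1 {c d : Char} (h : c ≠ d) (s : String) (hs : s.toList = [d]) :
    String.ofList [c] ≠ s := by
  intro he
  have h2 := congrArg String.toList he
  rw [hs] at h2
  exact h (by simpa using h2)

theorem sne2 (c : Char) (s : String) (a b : Char) (hs : s.toList = [a, b]) :
    String.ofList [c] ≠ s := by
  intro he
  have h2 := congrArg String.toList he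
  rw [hs] at h2
  simp at h2

theorem aGet_cases {o c : String} (h : aGet o = some c) :
    (o = "(" ∧ c = ")") ∨ (o = "{" ∧ c = "}") ∨ (o = "[" ∧ c = "]") ∨
      (o = "/*" ∧ c = "*/") := by
  unfold aGet at h
  split_ifs at h <;> simp_all

theorem aGet_eq_none_closer {t : String} (h : aClose t = true) : aGet t = none := by
  simp only [aClose, Bool.or_eq_true, decide_eq_true_eq] at h
  rcases h with ((rfl | rfl) | rfl) | rfl <;> decide

theorem aClose_false_of_open {t : String} (h : aGet t ≠ none) : aClose t = false := by
  by_contra hc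
  have h1 : aClose t = true := by revert hc; cases aClose t <;> simp
  exact h (aGet_eq_none_closer h1)

-- bTok output tokens are exactly the eight bracket tokens
def isBrTok (t : String) : Bool := aOpen t || aClose t

theorem bTok_brackets : ∀ cs : List Char, ∀ t ∈ bTok cs, isBrTok t = true := by
  intro cs
  induction cs using bTok.induct with
  | case1 => simp [bTok]
  | case2 c rest two h ih =>
    rw [bTokA h]
    intro t ht
    rcases List.mem_cons.mp ht with rfl | ht
    · decide
    · exact ih t ht
  | case3 c rest two h1 h2 ih =>
    rw [bTokB h1 h2]
    intro t ht
    rcases List.mem_cons.mp ht with rfl | ht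
    · decide
    · exact ih t ht
  | case4 c rest two h1 h2 h3 ih =>
    rw [bTokC h1 h2 h3]
    intro t ht
    rcases List.mem_cons.mp ht with rfl | ht
    · simp only [Bool.or_eq_true, decide_eq_true_eq] at h3
      rcases h3 with ((((rfl | rfl) | rfl) | rfl) | rfl) | rfl <;> decide
    · exact ih t ht
  | case5 c rest two h1 h2 h3 ih =>
    rw [bTokD h1 h2 h3]
    exact ih

theorem onePass_sublist : ∀ ts : List String, (onePass ts).Sublist ts := by
  intro ts
  induction ts using onePass.induct with
  | case1 => simp [onePass]
  | case2 t => simp [onePass]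
  | case3 t u rest h ih =>
    rw [onePass_pos rest h]
    exact ih.trans ((List.sublist_cons_self u rest).trans (List.sublist_cons_self t _))
  | case4 t u rest h ih =>
    rw [onePass_neg rest h]
    exact ih.cons₂ t

theorem reduceFix_sublist : ∀ ts : List String, (reduceFix ts).Sublist ts := by
  intro ts
  induction ts using reduceFix.induct with
  | case1 ts u h =>
    have he : reduceFix ts = ts := by rw [reduceFix]; exact if_pos h
    rw [he]
  | case2 ts u h ih =>
    have he : reduceFix ts = reduceFix (onePass ts) := by rw [reduceFix]; exact if_neg h
    rw [he]
    exact ih.trans (onePass_sublist ts)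

-- the irreducible residue has no adjacent matched pair
theorem reduceFix_fix : ∀ ts : List String, onePass (reduceFix ts) = reduceFix ts := by
  intro ts
  induction ts using reduceFix.induct with
  | case1 ts u h =>
    have he : reduceFix ts = ts := by rw [reduceFix]; exact if_pos h
    rw [he]; exact h
  | case2 ts u h ih =>
    have he : reduceFix ts = reduceFix (onePass ts) := by rw [reduceFix]; exact if_neg h
    rw [he]; exact ih

-- 'no adjacent matched pair' as a structural predicate
def noRed : List String → Prop
  | [] => True
  | [_] => True
  | t :: u :: rest => aGet t ≠ some u ∧ noRed (u :: rest)

theorem noRed_tail {t : String} {ts : List String} (h : noRed (t :: ts)) : noRed ts := by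
  cases ts with
  | nil => trivial
  | cons u rest => exact h.2

theorem fix_noRed : ∀ ts : List String, onePass ts = ts → noRed ts := by
  intro ts
  induction ts using onePass.induct with
  | case1 => intro _; trivial
  | case2 t => intro _; trivial
  | case3 t u rest h ih =>
    intro he
    exfalso
    rw [onePass_pos rest h] at he
    have h1 := onePass_length rest
    have h2 := congrArg List.length he
    simp only [List.length_cons] at h2
    omega
  | case4 t u rest h ih =>
    intro he
    rw [onePass_neg rest h] at he
    have htail : onePass (u :: rest) = u :: rest := by
      injection he
    exact ⟨h, ih htail⟩

-- A's char-level loop equals the token-level loop on the bracket tokens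
theorem aLoop_eq_runTok : ∀ (n : Nat) (cs : List Char), cs.length ≤ n →
    ∀ stack : List String, aLoop cs stack = runTok (bTok cs) stack := by
  intro n
  induction n with
  | zero =>
    intro cs hlen stack
    have : cs = [] := by cases cs <;> simp_all
    subst this
    cases stack <;> simp [aLoop, bTok, runTok]
  | succ n ih =>
    intro cs hlen stack
    cases cs with
    | nil => cases stack <;> simp [aLoop, bTok, runTok]
    | cons c rest =>
      by_cases h1 : (c :: rest).take 2 = ['/', '*']
      · match rest, h1 with
        | d :: r, h1 =>
          have h1' := h1
          simp only [List.take, List.cons.injEq] at h1'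
          obtain ⟨rfl, rfl, -⟩ := h1'
          have hr : r.length ≤ n := by simp at hlen; omega
          rw [aLoop.eq_def]
          norm_num [aOpen]
          rw [bTokA h1, List.drop_one, List.tail,
            runTok_opener (show aGet "/*" = some "*/" from rfl)]
          exact ih r hr _
      · by_cases h2 : (c :: rest).take 2 = ['*', '/']
        · match rest, h2 with
          | d :: r, h2 =>
            have h2' := h2
            simp only [List.take, List.cons.injEq] at h2'
            obtain ⟨rfl, rfl, -⟩ := h2'
            have hr : r.length ≤ n := by simp at hlen; omega
            rw [aLoop.eq_def]
            norm_num [aOpen, aClose]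
            rw [bTokB h1 h2, List.drop_one, List.tail,
              runTok_closer (show aGet "*/" = none from rfl) (show aClose "*/" = true from rfl)]
            cases stack with
            | nil => simp
            | cons top s' =>
              by_cases hm : aGet top = some "*/"
              · simp [hm]
                exact ih r hr s'
              · simp [hm]
        · have hr : rest.length ≤ n := by simp at hlen; omega
          rw [aLoop.eq_def]
          simp only [h1, h2, if_false]
          by_cases hc1 : c = '('
          · subst hc1
            norm_num [aOpen]
            rw [bTokC h1 h2 (by decide),
              runTok_opener (show aGet (String.ofList ['(']) = some ")" from rfl)]
            exact ih rest hr _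
          · by_cases hc2 : c = '{'
            · subst hc2
              norm_num [aOpen]
              rw [bTokC h1 h2 (by decide),
                runTok_opener (show aGet (String.ofList ['{']) = some "}" from rfl)]
              exact ih rest hr _
            · by_cases hc3 : c = '['
              · subst hc3
                norm_num [aOpen]
                rw [bTokC h1 h2 (by decide),
                  runTok_opener (show aGet (String.ofList ['[']) = some "]" from rfl)]
                exact ih rest hr _
              · have hopen : aOpen (String.ofList [c]) = false := by
                  simp only [aOpen, Bool.or_eq_false_iff, decide_eq_false_iff_not]
                  exact ⟨⟨⟨sne1 hc1 _ (by decide), sne1 hc2 _ (by decide)⟩,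
                    sne1 hc3 _ (by decide)⟩, sne2 c _ '/' '*' (by decide)⟩
                have hget : aGet (String.ofList [c]) = none := by
                  simp [aGet, sne1 hc1 "(" (by decide), sne1 hc2 "{" (by decide),
                    sne1 hc3 "[" (by decide), sne2 c "/*" '/' '*' (by decide)]
                by_cases hd1 : c = ')'
                · subst hd1
                  norm_num [hopen, aClose]
                  rw [bTokC h1 h2 (by decide),
                    runTok_closer hget (show aClose (String.ofList [')']) = true from rfl)]
                  cases stack with
                  | nil => simp
                  | cons top s' =>
                    by_cases hm : aGet top = some (String.ofList [')'])
                    · simp only [show (String.ofList [')'] : String) = ")" from rfl] at hm ⊢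
                      simp [hm]
                      exact ih rest hr s'
                    · simp only [show (String.ofList [')'] : String) = ")" from rfl] at hm ⊢
                      simp [hm]
                · by_cases hd2 : c = '}'
                  · subst hd2
                    norm_num [hopen, aClose]
                    rw [bTokC h1 h2 (by decide),
                      runTok_closer hget (show aClose (String.ofList ['}']) = true from rfl)]
                    cases stack with
                    | nil => simp
                    | cons top s' =>
                      by_cases hm : aGet top = some (String.ofList ['}'])
                      · simp only [show (String.ofList ['}'] : String) = "}" from rfl] at hm ⊢
                        simp [hm]
                        exact ih rest hr s'
                      · simp only [show (String.ofList ['}'] : String) = "}" from rfl] at hm ⊢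
                        simp [hm]
                  · by_cases hd3 : c = ']'
                    · subst hd3
                      norm_num [hopen, aClose]
                      rw [bTokC h1 h2 (by decide),
                        runTok_closer hget (show aClose (String.ofList [']']) = true from rfl)]
                      cases stack with
                      | nil => simp
                      | cons top s' =>
                        by_cases hm : aGet top = some (String.ofList [']'])
                        · simp only [show (String.ofList [']'] : String) = "]" from rfl] at hm ⊢
                          simp [hm]
                          exact ih rest hr s'
                        · simp only [show (String.ofList [']'] : String) = "]" from rfl] at hm ⊢
                          simp [hm]
                    · have hclose : aClose (String.ofList [c]) = false := by
                        simp only [aClose, Bool.or_eq_false_iff, decide_eq_false_iff_not]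
                        exact ⟨⟨⟨sne1 hd1 _ (by decide), sne1 hd2 _ (by decide)⟩,
                          sne1 hd3 _ (by decide)⟩, sne2 c _ '*' '/' (by decide)⟩
                      have hbr : (c = '(' || c = ')' || c = '{' || c = '}' || c = '[' || c = ']') = false := by
                        simp [hc1, hc2, hc3, hd1, hd2, hd3]
                      simp only [hopen, hclose, Bool.false_eq_true, if_false]
                      rw [bTokD h1 h2 (by simp [hbr])]
                      exact ih rest hr stack

-- a step-congruence for runTok: the first token's effect is independent of the tail
theorem runTok_cong {X Y : List String} (t : String) (st : List String)
    (h : ∀ st', runTok X st' = runTok Y st') :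
    runTok (t :: X) st = runTok (t :: Y) st := by
  cases hg : aGet t with
  | some cl => rw [runTok_opener hg, runTok_opener hg]; exact h _
  | none =>
    by_cases hc : aClose t
    · rw [runTok_closer hg hc, runTok_closer hg hc]
      cases st with
      | nil => rfl
      | cons top s' =>
        by_cases hm : aGet top = some t
        · simp [hm]; exact h _
        · simp [hm]
    · have hc' : aClose t = false := by revert hc; cases aClose t <;> simp
      rw [runTok_skip hg hc', runTok_skip hg hc']
      exact h _

-- cancelling an adjacent matched pair never changes A's token run
theorem runTok_pair {o c : String} (h : aGet o = some c) (rest : List String)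
    (st : List String) : runTok (o :: c :: rest) st = runTok rest st := by
  have hcl : aClose c = true := by
    rcases aGet_cases h with ⟨rfl, rfl⟩ | ⟨rfl, rfl⟩ | ⟨rfl, rfl⟩ | ⟨rfl, rfl⟩ <;> decide
  rw [runTok_opener h, runTok_closer (aGet_eq_none_closer hcl) hcl]
  simp [h]

theorem runTok_onePass : ∀ ts st, runTok (onePass ts) st = runTok ts st := by
  intro ts
  induction ts using onePass.induct with
  | case1 => intro st; simp [onePass]
  | case2 t => intro st; simp [onePass]
  | case3 t u rest h ih =>
    intro st
    rw [onePass_pos rest h, runTok_pair h rest st]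
    exact ih st
  | case4 t u rest h ih =>
    intro st
    rw [onePass_neg rest h]
    exact runTok_cong t st ih

theorem runTok_reduceFix : ∀ ts st, runTok (reduceFix ts) st = runTok ts st := by
  intro ts
  induction ts using reduceFix.induct with
  | case1 ts u h =>
    intro st
    have he : reduceFix ts = ts := by rw [reduceFix]; exact if_pos h
    rw [he]
  | case2 ts u h ih =>
    intro st
    have he : reduceFix ts = reduceFix (onePass ts) := by rw [reduceFix]; exact if_neg h
    rw [he, ih st, runTok_onePass]

-- on an irreducible all-bracket residue the stack run is the stackless readout
theorem runTok_readout : ∀ r : List String,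
    (∀ t ∈ r, isBrTok t = true) →
    noRed r →
    ∀ st : List String,
      (∀ t, r.head? = some t → ∀ top, st.head? = some top → aGet top ≠ some t) →
      runTok r st = readout st.head? r := by
  intro r
  induction r with
  | nil =>
    intro _ _ st _
    cases st <;> rfl
  | cons t ts ih =>
    intro hbr hnr st hsep
    cases hg : aGet t with
    | some cl =>
      have hcf : aClose t = false := aClose_false_of_open (by rw [hg]; simp)
      rw [runTok_opener hg]
      rw [readout.eq_def]
      cases st with
      | nil =>
        simp only [hcf, Bool.false_eq_true, if_false]
        have := ih (fun u hu => hbr u (by simp [hu])) (noRed_tail hnr) (t :: [])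
          (fun u hu top htop => by
            simp only [List.head?, Option.some.injEq] at htop
            subst htop
            cases ts with
            | nil => simp at hu
            | cons v vs =>
              simp only [List.head?, Option.some.injEq] at hu
              subst hu
              exact hnr.1)
        simpa using this
      | cons top s' =>
        simp only [hcf, Bool.false_eq_true, if_false]
        have := ih (fun u hu => hbr u (by simp [hu])) (noRed_tail hnr) (t :: top :: s')
          (fun u hu top' htop => by
            simp only [List.head?, Option.some.injEq] at htop
            subst htop
            cases ts with
            | nil => simp at hu
            | cons v vs =>
              simp only [List.head?, Option.some.injEq] at hu
              subst hu
              exact hnr.1)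
        simpa using this
    | none =>
      have hcl : aClose t = true := by
        have := hbr t (by simp)
        simp only [isBrTok, Bool.or_eq_true] at this
        rcases this with ho | hc
        · exfalso
          simp only [aOpen, Bool.or_eq_true, decide_eq_true_eq] at ho
          rcases ho with ((rfl | rfl) | rfl) | rfl <;> simp [aGet] at hg
        · exact hc
      rw [runTok_closer hg hcl]
      rw [readout.eq_def]
      cases st with
      | nil => simp [hcl]
      | cons top s' =>
        have hm : aGet top ≠ some t := hsep t rfl top rfl
        simp [hcl, hm]

-- ===== VERDICT (by name: the statement is the Claim_ definition above) =====
theorem check_symbols_spec : Claim_equal_check_symbols := by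
  intro s _
  unfold Spec_check_symbols check_symbols check_symbols_alt
  rw [aLoop_eq_runTok s.toList.length s.toList le_rfl []]
  rw [← runTok_reduceFix (bTok s.toList) []]
  have hbr : ∀ t ∈ reduceFix (bTok s.toList), isBrTok t = true :=
    fun t ht => bTok_brackets s.toList t ((reduceFix_sublist _).mem ht)
  have hnr := fix_noRed _ (reduceFix_fix (bTok s.toList))
  have := runTok_readout (reduceFix (bTok s.toList)) hbr hnr []
    (fun t _ top htop => by simp at htop)
  simpa using this
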